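-- pv_equiv track=rewrite | github.com/seheonnn/Algorithm | Programmers/PCCP/2-2 신입사원 교육.py | solution
-- ===== SOURCE A (Python) =====
-- import heapq
--
-- def solution(ability, number):
--     pq = ability[:]
--     heapq.heapify(pq)
--
--     for _ in range(number):
--         num1 = heapq.heappop(pq)
--         num2 = heapq.heappop(pq)
--         heapq.heappush(pq, num1 + num2)
--         heapq.heappush(pq, num1 + num2)
--
--     return sum(pq)
-- ===== SOURCE B (Python) =====
-- def solution(ability, number):
--     pq = sorted(ability)
--     for _ in range(number):
--         s = pq[0] + pq[1]
--         rest = pq[2:]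
--         k = 0
--         while k < len(rest) and rest[k] < s:
--             k += 1
--         pq = rest[:k] + [s, s] + rest[k:]
--     return sum(pq)
-- ===== Notes on version B (the rewrite author's own statement) =====
-- stated objective: alternative
-- what changed: Replaces the binary heap with a sorted list: sort once, pop the two head elements each round, and splice the doubled sum back in at its sorted position; the final sum is taken over the sorted list.
import Mathlib
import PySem

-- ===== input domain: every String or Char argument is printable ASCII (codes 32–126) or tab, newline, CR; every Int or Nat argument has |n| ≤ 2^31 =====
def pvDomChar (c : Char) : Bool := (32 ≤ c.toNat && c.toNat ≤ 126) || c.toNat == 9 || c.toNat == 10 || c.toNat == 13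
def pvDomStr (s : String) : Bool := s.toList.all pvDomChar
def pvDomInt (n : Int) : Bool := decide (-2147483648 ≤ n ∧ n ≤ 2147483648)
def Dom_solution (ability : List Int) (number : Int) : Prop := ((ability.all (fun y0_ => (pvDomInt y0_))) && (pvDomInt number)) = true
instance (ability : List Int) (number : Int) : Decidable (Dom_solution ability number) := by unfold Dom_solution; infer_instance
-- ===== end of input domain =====

-- B replaces the heap by a sorted list with head-pops and ordered re-insertion of the sum (same values, different data structure).

-- ===== PORT A =====
-- heapq.heappop is a library call, ported by its contract: it returns the smallest
-- element of the heap and leaves the remaining multiset (exact here: elements are Int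
-- values, ties among equal minima are equal values, and the final sum is order-free).
def pyHeappop? (pq : List Int) : Option (Int × List Int) :=
  match PySem.List.min? pq (fun x => x) with
  | none => none
  | some m => some (m, pq.erase m)

-- one iteration of A's loop body; when a heappop would raise IndexError the guard
-- returns pq unchanged (such inputs are excluded by Pre_solution)
def stepA (pq : List Int) : List Int :=
  match pyHeappop? pq with
  | none => pq
  | some (n1, r1) =>
    match pyHeappop? r1 with
    | none => pq
    | some (n2, r2) => r2 ++ [n1 + n2, n1 + n2]  -- the two heappushes of n1+n2

def solution (ability : List Int) (number : Int) : Int :=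
  ((PySem.List.pyRange 0 number 1).foldl (fun pq _ => stepA pq) ability).sum

-- ===== PORT B =====
-- one iteration of B's loop: pop the two heads of the sorted list, re-insert s twice at
-- position k = length of the longest prefix of rest with elements < s (the while loop);
-- rest[:k] / rest[k:] are takeWhile/dropWhile of that prefix predicate. The catch-all
-- branch is the totality guard for lists pq[0]/pq[1] would raise on (outside Pre_).
def stepB (pq : List Int) : List Int :=
  match pq with
  | a :: b :: rest =>
    let s := a + b
    rest.takeWhile (fun x => decide (x < s)) ++ s :: s :: rest.dropWhile (fun x => decide (x < s))
  | _ => pq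

def solution_alt (ability : List Int) (number : Int) : Int :=
  ((PySem.List.pyRange 0 number 1).foldl (fun pq _ => stepB pq)
      (PySem.List.sorted ability (fun x => x) false)).sum

-- ===== PRECONDITION & SPEC =====
-- Pre_ excludes exactly the inputs where both Pythons raise IndexError: at least one
-- iteration is run on fewer than two elements (the multiset size is loop-invariant).
def Pre_solution (ability : List Int) (number : Int) : Prop :=
  number ≤ 0 ∨ 2 ≤ ability.length
instance (ability : List Int) (number : Int) : Decidable (Pre_solution ability number) := by
  unfold Pre_solution; infer_instance

def pvWitness_solution : List Int × Int := ([3, 1, 2], 2)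

def Spec_solution (ability : List Int) (number : Int) (out : Int) : Prop := out = solution_alt ability number
instance (ability : List Int) (number : Int) (out : Int) : Decidable (Spec_solution ability number out) := by unfold Spec_solution; infer_instance

-- ===== CLAIM (what is proved, stated in full; the proofs are below) =====
def Claim_equal_solution : Prop := ∀ (ability : List Int) (number : Int), Dom_solution ability number → Pre_solution ability number → Spec_solution ability number (solution ability number)

-- ===== LEMMAS AND PROOFS =====

-- B's spliced insertion is two Mathlib orderedInserts
lemma stepB_insert_eq (s : Int) (rest : List Int) :
    rest.takeWhile (fun x => decide (x < s)) ++ s :: s :: rest.dropWhile (fun x => decide (x < s))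
      = List.orderedInsert (· ≤ ·) s (List.orderedInsert (· ≤ ·) s rest) := by
  induction rest with
  | nil => simp [List.orderedInsert]
  | cons x t ih =>
    by_cases h : x < s
    · have h' : ¬ s ≤ x := not_le.mpr h
      simp [List.orderedInsert, List.takeWhile, List.dropWhile, h, h', ih]
    · have h' : s ≤ x := not_lt.mp h
      simp [List.orderedInsert, List.takeWhile, List.dropWhile, h, h']

-- the head of a sorted list is the value min? returns on any permutation of it
lemma min_of_perm_sorted {l₁ : List Int} {a : Int} {t : List Int}
    (hp : (a :: t).Perm l₁) (hs : (a :: t).Pairwise (· ≤ ·)) :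
    PySem.List.min? l₁ (fun x => x) = some a := by
  have hne : l₁ ≠ [] := by
    intro he
    subst he
    exact absurd hp.length_eq (by simp)
  obtain ⟨m, hm⟩ : ∃ m, PySem.List.min? l₁ (fun x => x) = some m := by
    cases h : PySem.List.min? l₁ (fun x => x) with
    | none => exact absurd ((PySem.List.min?_eq_none_iff _ _).mp h) hne
    | some m => exact ⟨m, rfl⟩
  have hmem : m ∈ a :: t := hp.mem_iff.mpr (PySem.List.min?_mem hm)
  have hle : m ≤ a := PySem.List.min?_isMin hm a (hp.mem_iff.mp (by simp))
  have hge : a ≤ m := by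
    rcases List.mem_cons.mp hmem with h | h
    · omega
    · exact (List.pairwise_cons.mp hs).1 m h
  rw [hm, le_antisymm hle hge]

-- one loop iteration preserves "B's list is a sorted permutation of A's list"
lemma step_inv {l₁ l₂ : List Int} (hp : l₂.Perm l₁) (hs : l₂.Pairwise (· ≤ ·)) :
    (stepB l₂).Perm (stepA l₁) ∧ (stepB l₂).Pairwise (· ≤ ·) := by
  rcases l₂ with _ | ⟨a, _ | ⟨b, rest⟩⟩
  · have : l₁ = [] := hp.symm.eq_nil
    subst this
    exact ⟨List.Perm.refl _, List.Pairwise.nil⟩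
  · have : l₁ = [a] := List.perm_singleton.mp hp.symm
    subst this
    have hA : stepA [a] = [a] := by
      simp [stepA, pyHeappop?, PySem.List.min?]
    have hB : stepB [a] = [a] := rfl
    rw [hA, hB]
    exact ⟨List.Perm.refl _, by simp⟩
  · -- A pops a, then b; B pops the two heads a, b
    have hmin₁ : PySem.List.min? l₁ (fun x => x) = some a := min_of_perm_sorted hp hs
    have hp₁ : (b :: rest).Perm (l₁.erase a) := by
      have := hp.erase a
      rwa [List.erase_cons_head] at this
    have hs₁ : (b :: rest).Pairwise (· ≤ ·) := hs.tail
    have hmin₂ : PySem.List.min? (l₁.erase a) (fun x => x) = some b :=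
      min_of_perm_sorted hp₁ hs₁
    have hp₂ : rest.Perm ((l₁.erase a).erase b) := by
      have := hp₁.erase b
      rwa [List.erase_cons_head] at this
    have hA : stepA l₁ = ((l₁.erase a).erase b) ++ [a + b, a + b] := by
      simp [stepA, pyHeappop?, hmin₁, hmin₂]
    have hB : stepB (a :: b :: rest)
        = List.orderedInsert (· ≤ ·) (a + b) (List.orderedInsert (· ≤ ·) (a + b) rest) := by
      simp only [stepB]
      exact stepB_insert_eq (a + b) rest
    constructor
    · rw [hA, hB]
      have e1 : (List.orderedInsert (· ≤ ·) (a + b) (List.orderedInsert (· ≤ ·) (a + b) rest)).Perm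
          ((a + b) :: (a + b) :: rest) :=
        (List.perm_orderedInsert _ _ _).trans ((List.perm_orderedInsert _ _ _).cons _)
      have e2 : ((a + b) :: (a + b) :: rest).Perm ((a + b) :: (a + b) :: ((l₁.erase a).erase b)) :=
        (hp₂.cons _).cons _
      have e3 : ((a + b) :: (a + b) :: ((l₁.erase a).erase b)).Perm
          (((l₁.erase a).erase b) ++ [a + b, a + b]) := by
        simpa using (List.perm_append_comm (l₁ := [a + b, a + b]) (l₂ := (l₁.erase a).erase b))
      exact (e1.trans e2).trans e3
    · rw [hB]
      have hrest : rest.Pairwise (· ≤ ·) := hs₁.tail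
      exact List.Pairwise.orderedInsert _ _ (List.Pairwise.orderedInsert _ _ hrest)

-- the invariant through the whole fold
lemma fold_inv (L : List Int) :
    ∀ (l₁ l₂ : List Int), l₂.Perm l₁ → l₂.Pairwise (· ≤ ·) →
      (L.foldl (fun pq _ => stepB pq) l₂).Perm (L.foldl (fun pq _ => stepA pq) l₁) ∧
      (L.foldl (fun pq _ => stepB pq) l₂).Pairwise (· ≤ ·) := by
  induction L with
  | nil => intro l₁ l₂ hp hs; exact ⟨hp, hs⟩
  | cons x t ih =>
    intro l₁ l₂ hp hs
    obtain ⟨hp', hs'⟩ := step_inv hp hs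
    simpa [List.foldl_cons] using ih (stepA l₁) (stepB l₂) hp' hs'

-- ===== VERDICT (by name: the statement is the Claim_ definition above) =====
theorem solution_spec : Claim_equal_solution := by
  intro ability number _ _
  unfold Spec_solution solution solution_alt
  have h := fold_inv (PySem.List.pyRange 0 number 1) ability
    (PySem.List.sorted ability (fun x => x) false)
    (PySem.List.sorted_perm ability (fun x => x) false)
    (by simpa using PySem.List.sorted_pairwise ability (fun x => x))
  exact (h.1.sum_eq).symm
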